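-- pv_equiv track=rewrite | github.com/cwainwright/think-inside-the-box | src/util/maze.py | maze_as_array
-- ===== SOURCE A (Python) =====
-- def maze_as_array(
--         m: int,
--         n: int,
--         floors: set[tuple[int, int]],
-- ) -> list[list[bool]]:
--     """Generates and returns maze in matrix form"""
--     matrix = []
--     for y in range(n):
--         row = []
--         for x in range(m):
--             tile = True if (x, y) in floors else False
--             row.append(tile)
--         matrix.append(row)
--     return matrix
-- ===== SOURCE B (Python) =====
-- def maze_as_array(
--         m: int,
--         n: int,
--         floors: set[tuple[int, int]],
-- ) -> list[list[bool]]: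
--     """Generates and returns maze in matrix form"""
--     matrix = [[False for _ in range(m)] for _ in range(n)]
--     for (x, y) in floors:
--         if 0 <= x < m and 0 <= y < n:
--             matrix[y][x] = True
--     return matrix
-- ===== Notes on version B (the rewrite author's own statement) =====
-- stated objective: alternative
-- what changed: Instead of scanning every cell and testing set membership, B builds an all-False grid and scatters only the in-bounds floor coordinates into it.
import Mathlib
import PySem

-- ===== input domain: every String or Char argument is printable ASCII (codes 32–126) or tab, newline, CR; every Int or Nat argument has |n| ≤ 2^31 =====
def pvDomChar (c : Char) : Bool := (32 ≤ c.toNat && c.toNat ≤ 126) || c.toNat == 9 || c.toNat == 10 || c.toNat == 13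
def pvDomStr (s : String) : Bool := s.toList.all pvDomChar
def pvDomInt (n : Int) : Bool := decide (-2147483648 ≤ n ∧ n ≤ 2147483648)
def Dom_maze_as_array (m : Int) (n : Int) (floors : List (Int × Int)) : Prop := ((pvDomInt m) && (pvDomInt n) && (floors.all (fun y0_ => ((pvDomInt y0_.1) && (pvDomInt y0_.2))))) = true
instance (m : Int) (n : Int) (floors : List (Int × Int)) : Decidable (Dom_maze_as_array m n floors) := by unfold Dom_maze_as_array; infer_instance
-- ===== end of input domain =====

-- B replaces A's full m×n membership scan by a blank False grid into which only the
-- in-bounds floor coordinates are scattered (alternative decomposition, same result).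

-- ===== PORT A =====
-- literal transliteration: outer loop over range(n) appending rows, inner loop over
-- range(m) appending a membership test per cell
def maze_as_array (m : Int) (n : Int) (floors : List (Int × Int)) : List (List Bool) :=
  (PySem.List.pyRange 0 n 1).foldl
    (fun matrix y =>
      matrix ++ [(PySem.List.pyRange 0 m 1).foldl
        (fun row x => row ++ [if (x, y) ∈ floors then true else false]) []])
    []

-- ===== PORT B =====
-- literal transliteration of Source B: blank grid comprehension, then scatter loop with
-- a bounds guard; matrix[y][x] = True is List.modify/List.set at the guarded indices
def maze_as_array_alt (m : Int) (n : Int) (floors : List (Int × Int)) : List (List Bool) :=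
  let matrix := (PySem.List.pyRange 0 n 1).map
    (fun _ => (PySem.List.pyRange 0 m 1).map (fun _ => false))
  floors.foldl
    (fun mat p =>
      if 0 ≤ p.1 ∧ p.1 < m ∧ 0 ≤ p.2 ∧ p.2 < n then
        mat.modify p.2.toNat (fun row => row.set p.1.toNat true)
      else mat)
    matrix

-- ===== PRECONDITION & SPEC =====
def Spec_maze_as_array (m : Int) (n : Int) (floors : List (Int × Int)) (out : List (List Bool)) : Prop := out = maze_as_array_alt m n floors
instance (m : Int) (n : Int) (floors : List (Int × Int)) (out : List (List Bool)) : Decidable (Spec_maze_as_array m n floors out) := by unfold Spec_maze_as_array; infer_instance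

-- ===== CLAIM (what is proved, stated in full; the proofs are below) =====
def Claim_equal_maze_as_array : Prop := ∀ (m : Int) (n : Int) (floors : List (Int × Int)), Dom_maze_as_array m n floors → Spec_maze_as_array m n floors (maze_as_array m n floors)

-- ===== LEMMAS AND PROOFS =====

-- append-fold is map
theorem pv_foldl_append {α β : Type} (f : α → β) (l : List α) (init : List β) :
    l.foldl (fun acc a => acc ++ [f a]) init = init ++ l.map f := by
  induction l generalizing init with
  | nil => simp
  | cons a l ih => simp [List.foldl, ih]

-- the grid common to both characterisations
def pvGrid (m n : Nat) (f : Nat → Nat → Bool) : List (List Bool) :=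
  (List.range n).map (fun i => (List.range m).map (fun j => f j i))

theorem pvGrid_congr {m n : Nat} {f g : Nat → Nat → Bool}
    (h : ∀ j i, j < m → i < n → f j i = g j i) : pvGrid m n f = pvGrid m n g := by
  unfold pvGrid
  refine List.map_congr_left (fun i hi => ?_)
  refine List.map_congr_left (fun j hj => ?_)
  exact h j i (List.mem_range.mp hj) (List.mem_range.mp hi)

theorem pv_A_eq (m n : Int) (floors : List (Int × Int)) :
    maze_as_array m n floors =
      pvGrid m.toNat n.toNat (fun j i => decide (((j : Int), (i : Int)) ∈ floors)) := by
  unfold maze_as_array pvGrid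
  rw [pv_foldl_append]
  rw [PySem.List.pyRange_one 0 n]
  simp only [List.map_map, List.nil_append, Int.sub_zero]
  refine List.map_congr_left (fun i _ => ?_)
  simp only [Function.comp_apply]
  rw [pv_foldl_append]
  rw [PySem.List.pyRange_one 0 m]
  simp only [List.map_map, List.nil_append, Int.sub_zero]
  refine List.map_congr_left (fun j _ => ?_)
  simp [Function.comp]

theorem pv_set_map_range {m : Nat} (f : Nat → Bool) (j0 : Nat) (_hj : j0 < m) :
    ((List.range m).map f).set j0 true
      = (List.range m).map (fun j => if j = j0 then true else f j) := by
  apply List.ext_getElem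
  · simp
  · intro k h1 h2
    simp only [List.getElem_set, List.getElem_map, List.getElem_range]
    simp only [List.length_set, List.length_map, List.length_range] at h1
    split_ifs with h h' h'
    · rfl
    · omega
    · omega
    · rfl

theorem pv_modify_grid {m n : Nat} (f : Nat → Nat → Bool) (j0 i0 : Nat)
    (hj : j0 < m) (_hi : i0 < n) :
    (pvGrid m n f).modify i0 (fun row => row.set j0 true)
      = pvGrid m n (fun j i => if j = j0 ∧ i = i0 then true else f j i) := by
  unfold pvGrid
  apply List.ext_getElem
  · simp
  · intro k h1 h2
    simp only [List.length_modify, List.length_map, List.length_range] at h1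
    rw [List.getElem_modify]
    simp only [List.getElem_map, List.getElem_range]
    split_ifs with hk
    · subst hk
      rw [pv_set_map_range _ j0 hj]
      refine List.map_congr_left (fun j _ => ?_)
      by_cases hjj : j = j0 <;> simp [hjj]
    · refine List.map_congr_left (fun j _ => ?_)
      have hk' : k ≠ i0 := fun h => hk h.symm
      simp [hk']

-- scatter invariant: folding B's step over floors ORs in the membership of each cell
theorem pv_scatter (m n : Int) (floors : List (Int × Int)) (g : Nat → Nat → Bool) :
    floors.foldl
      (fun mat p =>
        if 0 ≤ p.1 ∧ p.1 < m ∧ 0 ≤ p.2 ∧ p.2 < n then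
          mat.modify p.2.toNat (fun row => row.set p.1.toNat true)
        else mat)
      (pvGrid m.toNat n.toNat g)
    = pvGrid m.toNat n.toNat
        (fun j i => g j i || decide (((j : Int), (i : Int)) ∈ floors)) := by
  induction floors generalizing g with
  | nil => simp [pvGrid]
  | cons p rest ih =>
    simp only [List.foldl_cons]
    by_cases hb : 0 ≤ p.1 ∧ p.1 < m ∧ 0 ≤ p.2 ∧ p.2 < n
    · rw [if_pos hb]
      obtain ⟨h1, h2, h3, h4⟩ := hb
      rw [pv_modify_grid g p.1.toNat p.2.toNat (by omega) (by omega)]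
      rw [ih]
      apply pvGrid_congr
      intro j i hj hi
      have hmem : (((j : Int), (i : Int)) = p) ↔ (j = p.1.toNat ∧ i = p.2.toNat) := by
        constructor
        · intro h; rw [← h]; simp
        · rintro ⟨rfl, rfl⟩
          rw [Prod.ext_iff]; constructor <;> simp <;> omega
      by_cases hc : j = p.1.toNat ∧ i = p.2.toNat
      · have hp : ((j : Int), (i : Int)) ∈ p :: rest := by
          rw [List.mem_cons]; left; exact hmem.mpr hc
        rw [if_pos hc]
        simp [hp]
      · rw [if_neg hc]
        have hnp : ¬ (((j : Int), (i : Int)) = p) := fun h => hc (hmem.mp h)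
        simp [List.mem_cons, hnp]
    · rw [if_neg hb]
      rw [ih]
      apply pvGrid_congr
      intro j i hj hi
      have hne : ¬ (((j : Int), (i : Int)) = p) := by
        intro h
        apply hb
        rw [← h]
        refine ⟨by simp, by simp; omega, by simp, by simp; omega⟩
      simp [List.mem_cons, hne]

theorem pv_B_eq (m n : Int) (floors : List (Int × Int)) :
    maze_as_array_alt m n floors =
      pvGrid m.toNat n.toNat (fun j i => decide (((j : Int), (i : Int)) ∈ floors)) := by
  unfold maze_as_array_alt
  have hblank : (PySem.List.pyRange 0 n 1).map
      (fun _ => (PySem.List.pyRange 0 m 1).map (fun _ => false))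
      = pvGrid m.toNat n.toNat (fun _ _ => false) := by
    unfold pvGrid
    rw [PySem.List.pyRange_one 0 n, PySem.List.pyRange_one 0 m]
    simp [List.map_map, Function.comp_def]
  simp only []
  rw [hblank, pv_scatter]
  simp

-- ===== VERDICT (by name: the statement is the Claim_ definition above) =====
theorem maze_as_array_spec : Claim_equal_maze_as_array := by
  intro m n floors _
  unfold Spec_maze_as_array
  rw [pv_A_eq, pv_B_eq]
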